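-- pv_equiv track=rewrite | github.com/bkk21/Algorithm-log | 프로그래머스/0/120921. 문자열 밀기/문자열 밀기.py | solution
-- ===== SOURCE A (Python) =====
-- def solution(A, B):
--     answer = 0
--
--     for i in range(len(A)):
--         if A == B:
--             break
--
--         A = A[-1] + A[:-1]
--         answer += 1
--
--     if answer == len(A):
--         answer = -1
--
--     return answer
-- ===== SOURCE B (Python) =====
-- def solution(A, B):
--     # number of right-rotations of A that yield B, else -1;
--     # a right-rotation of A equals B iff A occurs in B+B, and the first
--     # occurrence position is exactly the minimal rotation count.
--     if len(A) != len(B):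
--         return -1
--     return (B + B).find(A)
-- ===== Notes on version B (the rewrite author's own statement) =====
-- stated objective: faster
-- what changed: Replaces the rotate-and-compare loop (build a rotated copy and compare full strings each step) by a single substring search of A in B+B, whose first-hit position is exactly the minimal rotation count.
-- intended difference: On the empty input A='' and B='' A returns -1 (its 'answer == len(A)' test misfires because 0 == 0) although zero shifts already turn A into B; B returns the intended 0. — e.g. on solution("", ""): A returns -1, B returns 0
import Mathlib
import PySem

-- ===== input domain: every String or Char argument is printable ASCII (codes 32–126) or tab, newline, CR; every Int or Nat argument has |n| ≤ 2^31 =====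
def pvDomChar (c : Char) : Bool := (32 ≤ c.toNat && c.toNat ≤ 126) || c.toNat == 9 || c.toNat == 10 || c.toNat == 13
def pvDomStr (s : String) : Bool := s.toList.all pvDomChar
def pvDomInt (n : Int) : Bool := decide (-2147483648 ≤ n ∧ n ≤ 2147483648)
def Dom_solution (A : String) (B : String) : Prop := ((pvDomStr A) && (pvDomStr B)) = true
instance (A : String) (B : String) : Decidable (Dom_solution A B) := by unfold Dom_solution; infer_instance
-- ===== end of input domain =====

-- B replaces A's rotate-and-compare loop by one substring search of A in B+B (first hit = minimal shift count);
-- on the single corner A = B = "" A's final `answer == len(A)` test misfires and returns -1 where B returns the intended 0.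


-- ===== PORT A =====
-- A = A[-1] + A[:-1]  (the loop body only runs for nonempty A, so the `none` branch is unreachable)
def pvRotA (l : List Char) : List Char :=
  match PySem.List.pyGet? l (-1) with
  | some c => [c] ++ PySem.List.slice l none (some (-1))
  | none => []

-- the `for i in range(len(A))` loop with its `break`; state = (A, answer)
def pvLoopA (b : List Char) : Nat → List Char → Int → List Char × Int
  | 0, a, ans => (a, ans)
  | fuel + 1, a, ans => if a = b then (a, ans) else pvLoopA b fuel (pvRotA a) (ans + 1)

def solution (A : String) (B : String) : Int :=
  let p := pvLoopA B.toList A.toList.length A.toList 0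
  if p.2 = (p.1.length : Int) then -1 else p.2

-- ===== PORT B =====
def solution_alt (A : String) (B : String) : Int :=
  if A.toList.length ≠ B.toList.length then -1
  else PySem.Chars.find (B.toList ++ B.toList) A.toList

-- ===== PRECONDITION & SPEC =====
-- On A = B = "" A returns -1 (its `answer == len(A)` test misfires at 0 == 0) although zero
-- shifts already turn A into B; B returns the intended 0.
def D_solution (A : String) (B : String) : Prop := A = "" ∧ B = ""
instance (A : String) (B : String) : Decidable (D_solution A B) := by unfold D_solution; infer_instance

def Spec_solution (A : String) (B : String) (out : Int) : Prop := ¬ D_solution A B → out = solution_alt A B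
instance (A : String) (B : String) (out : Int) : Decidable (Spec_solution A B out) := by unfold Spec_solution; infer_instance

def pvDiffWitness_solution : String × String := ("", "")
def pvDiffWitnessOut_solution : Int × Int := (-1, 0)

-- ===== CLAIM (what is proved, stated in full; the proofs are below) =====
def Claim_unchanged_solution : Prop := ∀ (A : String) (B : String), Dom_solution A B → Spec_solution A B (solution A B)
def Claim_changed_solution : Prop := Dom_solution (pvDiffWitness_solution.1) (pvDiffWitness_solution.2) ∧ D_solution (pvDiffWitness_solution.1) (pvDiffWitness_solution.2) ∧ solution (pvDiffWitness_solution.1) (pvDiffWitness_solution.2) = pvDiffWitnessOut_solution.1 ∧ solution_alt (pvDiffWitness_solution.1) (pvDiffWitness_solution.2) = pvDiffWitnessOut_solution.2 ∧ pvDiffWitnessOut_solution.1 ≠ pvDiffWitnessOut_solution.2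
def Claim_exact_solution : Prop := ∀ (A : String) (B : String), Dom_solution A B → D_solution A B → solution A B ≠ solution_alt A B

-- ===== LEMMAS AND PROOFS =====

-- pvRotA is a right rotation: on a nonempty list it is `rotate (length - 1)`
theorem pvRotA_nil : pvRotA [] = [] := by
  simp [pvRotA, PySem.List.pyGet?, PySem.List.pyIdx?]

theorem pvRotA_concat (ys : List Char) (y : Char) : pvRotA (ys ++ [y]) = y :: ys := by
  simp [pvRotA, PySem.List.pyGet?, PySem.List.pyIdx?, PySem.List.slice_to_neg_one]

theorem pvRotA_rotate (l : List Char) (h : l ≠ []) : pvRotA l = l.rotate (l.length - 1) := by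
  obtain ⟨ys, y, rfl⟩ : ∃ ys y, l = ys ++ [y] :=
    ⟨l.dropLast, l.getLast h, (List.dropLast_concat_getLast h).symm⟩
  rw [pvRotA_concat, List.rotate_eq_drop_append_take (by simp)]
  simp

theorem pvRotA_length (l : List Char) : (pvRotA l).length = l.length := by
  rcases eq_or_ne l [] with rfl | h
  · rw [pvRotA_nil]
  · rw [pvRotA_rotate l h, List.length_rotate]

theorem pvIter_length (k : Nat) (l : List Char) : (pvRotA^[k] l).length = l.length := by
  induction k generalizing l with
  | zero => rfl
  | succ m ih => rw [Function.iterate_succ_apply, ih, pvRotA_length]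

theorem pvIter_rotate (k : Nat) (l : List Char) (h : l ≠ []) :
    pvRotA^[k] l = l.rotate (k * (l.length - 1)) := by
  induction k with
  | zero => simp
  | succ m ih =>
    have hne : l.rotate (m * (l.length - 1)) ≠ [] := by
      intro hnil
      exact h (by simpa using congrArg List.length hnil)
    rw [Function.iterate_succ_apply', ih, pvRotA_rotate _ hne, List.length_rotate,
      List.rotate_rotate]
    ring_nf

-- right-rotating a k times hits b exactly when a is b left-rotated by k
theorem pvHit_iff (a b : List Char) (k : Nat) (hl : a.length = b.length)
    (hn : 0 < a.length) (_hk : k < a.length) : pvRotA^[k] a = b ↔ a = b.rotate k := by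
  have hane : a ≠ [] := by intro h; rw [h] at hn; simp at hn
  have hia : a.rotate (k * (a.length - 1) + k) = a := by
    have he : k * (a.length - 1) + k = k * a.length := by
      calc k * (a.length - 1) + k = k * (a.length - 1 + 1) := by ring
        _ = k * a.length := by rw [Nat.sub_add_cancel hn]
    rw [he, ← List.rotate_mod, Nat.mul_mod_left, List.rotate_zero]
  have hib : b.rotate (k + k * (b.length - 1)) = b := by
    have he : k + k * (b.length - 1) = k * b.length := by
      calc k + k * (b.length - 1) = k * (b.length - 1 + 1) := by ring
        _ = k * b.length := by rw [Nat.sub_add_cancel (hl ▸ hn)]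
    rw [he, ← List.rotate_mod, Nat.mul_mod_left, List.rotate_zero]
  rw [pvIter_rotate k a hane]
  constructor
  · intro h
    have := congrArg (List.rotate · k) h
    simp only [List.rotate_rotate] at this
    rw [hia] at this
    exact this
  · intro h
    rw [h, List.length_rotate, List.rotate_rotate]
    exact hib

-- the loop runs to exhaustion when no rotation ever equals b
theorem pvLoop_no_hit (b : List Char) (fuel : Nat) : ∀ (a : List Char) (ans : Int),
    (∀ k < fuel, pvRotA^[k] a ≠ b) → pvLoopA b fuel a ans = (pvRotA^[fuel] a, ans + fuel) := by
  induction fuel with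
  | zero => intro a ans _; simp [pvLoopA]
  | succ m ih =>
    intro a ans h
    have h0 : a ≠ b := by simpa using h 0 (by omega)
    rw [pvLoopA, if_neg h0, ih (pvRotA a) (ans + 1)
      (fun k hk => by rw [← Function.iterate_succ_apply]; exact h (k + 1) (by omega))]
    rw [← Function.iterate_succ_apply, Prod.mk.injEq]
    refine ⟨rfl, by push_cast; ring⟩

-- the loop breaks at the first k with rotation = b
theorem pvLoop_hit (b : List Char) (k : Nat) : ∀ (fuel : Nat) (a : List Char) (ans : Int),
    k < fuel → pvRotA^[k] a = b → (∀ j < k, pvRotA^[j] a ≠ b) →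
    pvLoopA b fuel a ans = (b, ans + k) := by
  induction k with
  | zero =>
    intro fuel a ans hf hhit _
    obtain ⟨m, rfl⟩ : ∃ m, fuel = m + 1 := ⟨fuel - 1, by omega⟩
    simp at hhit
    rw [pvLoopA, if_pos hhit]
    simp [hhit]
  | succ j ih =>
    intro fuel a ans hf hhit hmin
    obtain ⟨m, rfl⟩ : ∃ m, fuel = m + 1 := ⟨fuel - 1, by omega⟩
    have h0 : a ≠ b := by simpa using hmin 0 (by omega)
    rw [pvLoopA, if_neg h0, ih m (pvRotA a) (ans + 1) (by omega)
      (by rw [← Function.iterate_succ_apply]; exact hhit)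
      (fun i hi => by rw [← Function.iterate_succ_apply]; exact hmin (i + 1) (by omega)),
      Prod.mk.injEq]
    refine ⟨rfl, by push_cast; ring⟩

-- an occurrence of a at position p in b ++ b is exactly "a = b left-rotated p"
theorem pvOcc_iff (a b : List Char) (hl : a.length = b.length)
    (p : Nat) (hp : p ≤ b.length) : a <+: (b ++ b).drop p ↔ a = b.rotate p := by
  rw [List.drop_append_of_le_length hp, List.prefix_iff_eq_take, hl, List.take_append,
    List.length_drop]
  have h1 : (b.drop p).take b.length = b.drop p := List.take_of_length_le (by simp)
  have h2 : b.length - (b.length - p) = p := by omega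
  rw [h1, h2, List.rotate_eq_drop_append_take hp]

theorem pvOcc_bound (a b : List Char) (hl : a.length = b.length) (hpos : 0 < a.length)
    (p : Nat) (h : a <+: (b ++ b).drop p) : p ≤ b.length := by
  have hlen := h.length_le
  rw [List.length_drop, List.length_append] at hlen
  omega

-- occurrence at position length collapses to occurrence at 0 (a = b)
theorem pvOcc_length (a b : List Char) (hl : a.length = b.length)
    (h : a <+: (b ++ b).drop b.length) : a = b := by
  have := (pvOcc_iff a b hl b.length (le_refl _)).mp h
  rwa [List.rotate_length] at this

-- the whole equivalence, stated over the underlying character lists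
theorem pvMainL (a b : List Char) (hne : ¬(a = [] ∧ b = [])) :
    (if (pvLoopA b a.length a 0).2 = ((pvLoopA b a.length a 0).1.length : Int) then -1
     else (pvLoopA b a.length a 0).2)
    = if a.length ≠ b.length then (-1 : Int) else PySem.Chars.find (b ++ b) a := by
  by_cases hl : a.length = b.length
  · have hpos : 0 < a.length := by
      rcases Nat.eq_zero_or_pos a.length with h0 | h
      · exact absurd ⟨List.eq_nil_iff_length_eq_zero.mpr h0,
          List.eq_nil_iff_length_eq_zero.mpr (by omega)⟩ hne
      · exact h
    by_cases hex : ∃ k, k < a.length ∧ pvRotA^[k] a = b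
    · -- some rotation matches: both sides give the least matching k
      have hexP : ∃ k, pvRotA^[k] a = b := ⟨hex.choose, hex.choose_spec.2⟩
      have hk₀hit : pvRotA^[Nat.find hexP] a = b := Nat.find_spec hexP
      have hk₀min : ∀ j < Nat.find hexP, pvRotA^[j] a ≠ b := fun j hj => Nat.find_min hexP hj
      have hk₀lt : Nat.find hexP < a.length := by
        obtain ⟨k, hk, hkh⟩ := hex
        exact lt_of_le_of_lt (Nat.find_min' hexP hkh) hk
      have hrot : a = b.rotate (Nat.find hexP) := (pvHit_iff a b _ hl hpos hk₀lt).mp hk₀hit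
      have hocc : a <+: (b ++ b).drop (Nat.find hexP) :=
        (pvOcc_iff a b hl _ (by omega)).mpr hrot
      have hfind : PySem.Chars.find (b ++ b) a = ((Nat.find hexP : Nat) : Int) := by
        have hinf : a <:+: (b ++ b) :=
          hocc.isInfix.trans (List.drop_suffix (Nat.find hexP) (b ++ b)).isInfix
        have hfnn : 0 ≤ PySem.Chars.find (b ++ b) a := by
          rw [PySem.Chars.find_nonneg_iff]; exact hinf
        obtain ⟨hpref, hmin⟩ := PySem.Chars.find_spec hfnn
        have hfle : (PySem.Chars.find (b ++ b) a).toNat ≤ b.length :=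
          pvOcc_bound a b hl hpos _ hpref
        have hfne : (PySem.Chars.find (b ++ b) a).toNat ≠ b.length := by
          intro hfn
          have hab : a = b := pvOcc_length a b hl (hfn ▸ hpref)
          exact hmin 0 (by omega) (by simp [hab])
        have hflt : (PySem.Chars.find (b ++ b) a).toNat < a.length := by omega
        have hfhit : pvRotA^[(PySem.Chars.find (b ++ b) a).toNat] a = b :=
          (pvHit_iff a b _ hl hpos hflt).mpr ((pvOcc_iff a b hl _ (by omega)).mp hpref)
        have h1 : Nat.find hexP ≤ (PySem.Chars.find (b ++ b) a).toNat :=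
          Nat.find_min' hexP hfhit
        have h2 : ¬ Nat.find hexP < (PySem.Chars.find (b ++ b) a).toNat :=
          fun hlt => hmin _ hlt hocc
        omega
      have hne2 : Nat.find hexP ≠ b.length := by omega
      rw [pvLoop_hit b (Nat.find hexP) a.length a 0 hk₀lt hk₀hit hk₀min, hfind]
      simp [hl, hne2]
    · -- no rotation matches: both sides give -1
      push Not at hex
      have hf : PySem.Chars.find (b ++ b) a = -1 := by
        rw [PySem.Chars.find_eq_neg_one_iff]
        intro hinf
        obtain ⟨j, hj⟩ := (PySem.Chars.exists_prefix_drop_iff_isIn a (b ++ b)).mpr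
          ((PySem.Chars.isIn_iff_infix a (b ++ b)).mpr hinf)
        have hjle : j ≤ b.length := pvOcc_bound a b hl hpos j hj
        rcases Nat.lt_or_ge j b.length with hjlt | hjge
        · exact hex j (by omega) ((pvHit_iff a b j hl hpos (by omega)).mpr
            ((pvOcc_iff a b hl j (by omega)).mp hj))
        · have hjn : j = b.length := by omega
          have hab : a = b := pvOcc_length a b hl (hjn ▸ hj)
          exact hex 0 hpos (by simpa using hab)
      rw [pvLoop_no_hit b a.length a 0 hex, hf]
      simp [pvIter_length, hl]
  · -- different lengths: every rotation keeps a's length, so no hit; both sides -1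
    have hno : ∀ k < a.length, pvRotA^[k] a ≠ b := by
      intro k _ hk
      exact hl (by rw [← hk, pvIter_length])
    rw [pvLoop_no_hit b a.length a 0 hno]
    simp [pvIter_length, hl]

theorem pvMain : ∀ (A B : String), ¬ D_solution A B → solution A B = solution_alt A B := by
  intro A B hD
  have hne : ¬(A.toList = [] ∧ B.toList = []) := by
    rintro ⟨h1, h2⟩
    exact hD ⟨String.toList_eq_nil_iff.mp h1, String.toList_eq_nil_iff.mp h2⟩
  exact pvMainL A.toList B.toList hne

-- ===== VERDICT (by name: the statement is the Claim_ definition above) =====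
theorem solution_spec : Claim_unchanged_solution := by
  intro A B _ hD; exact pvMain A B hD

theorem solution_changed : Claim_changed_solution := by
  unfold Claim_changed_solution; decide

theorem solution_tight : Claim_exact_solution := by
  intro A B _ hD
  obtain ⟨hA, hB⟩ := hD; subst hA; subst hB; decide
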